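-- pv_equiv track=rewrite | github.com/kotope/aio_energy_management | custom_components/aio_energy_management/coordinator.py | _update_archived
-- ===== SOURCE A (Python) =====
-- def _update_archived(
--     entity_id: str, existing_archive: list | None, new_data: list | None
-- ) -> list:
--     """Merge archived lists by 'start' key, preferring self.data[entity_id] values on conflict."""
--
--     current_archived = existing_archive
--     if current_archived is None:
--         current_archived = []
--
--     # Build dicts keyed by 'start' for fast lookup
--     current_by_start = {
--         item["start"]: item for item in current_archived if "start" in item
--     }
--
--     new_by_start = []
--     if new_data is not None:
--         new_by_start = {item["start"]: item for item in new_data if "start" in item}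
--
--     # Merge keys: use current if exists, else new
--     merged = []
--     all_starts = set(current_by_start) | set(new_by_start)
--     for start in sorted(all_starts):
--         if start in current_by_start:
--             merged.append(current_by_start[start])
--         else:
--             merged.append(new_by_start[start])
--
--     return merged
-- ===== SOURCE B (Python) =====
-- def _update_archived(entity_id, existing_archive, new_data):
--     """Decorate-sort-scan: tag every keyed item with (start, -position) over the
--     concatenation new+existing, sort once, keep the first tag of each start-run
--     (= highest position = existing over new, later over earlier)."""
--     items = (new_data or []) + (existing_archive or [])
--     tagged = [(it["start"], pos, it) for pos, it in enumerate(items) if "start" in it]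
--     tagged.sort(key=lambda t: (t[0], -t[1]))
--     merged = []
--     for start, _, it in tagged:
--         if not merged or merged[-1][0] != start:
--             merged.append((start, it))
--     return [it for _, it in merged]
-- ===== Notes on version B (the rewrite author's own statement) =====
-- stated objective: alternative
-- what changed: Replaces A's two start-keyed dicts, key-set union and per-key if/else lookup loop with a single decorate-sort-scan: every keyed item of new+existing is tagged (start, -position), the one tagged list is sorted once, and one linear scan keeps the first tag of each start-run (highest position = existing over new, later over earlier).
import Mathlib
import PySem

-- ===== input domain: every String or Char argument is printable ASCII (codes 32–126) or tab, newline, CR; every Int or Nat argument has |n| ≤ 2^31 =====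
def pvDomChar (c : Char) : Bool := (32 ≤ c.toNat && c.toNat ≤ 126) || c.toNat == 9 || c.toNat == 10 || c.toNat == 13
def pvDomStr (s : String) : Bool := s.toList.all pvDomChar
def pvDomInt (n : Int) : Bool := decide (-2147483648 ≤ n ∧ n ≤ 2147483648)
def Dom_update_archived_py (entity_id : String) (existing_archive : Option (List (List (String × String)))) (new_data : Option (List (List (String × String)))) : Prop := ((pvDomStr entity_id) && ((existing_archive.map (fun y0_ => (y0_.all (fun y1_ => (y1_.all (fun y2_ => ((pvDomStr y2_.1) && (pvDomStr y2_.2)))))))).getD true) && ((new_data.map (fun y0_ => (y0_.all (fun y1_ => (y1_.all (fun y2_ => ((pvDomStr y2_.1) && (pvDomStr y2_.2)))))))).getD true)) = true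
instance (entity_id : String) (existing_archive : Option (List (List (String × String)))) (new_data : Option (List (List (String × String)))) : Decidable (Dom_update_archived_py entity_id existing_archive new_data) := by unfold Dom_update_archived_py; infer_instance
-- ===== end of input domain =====

-- B replaces A's two start-keyed dicts, key-set union and per-key lookup loop by a single
-- decorate-sort-scan: tag each keyed item with (start, -position) over new+existing, sort once,
-- keep the first tag of each start-run (= highest position = existing over new, later over earlier).
-- Items (Python dicts) are modelled as PySem.Dict built from the association list; the returned
-- list carries each item's canonical .items pair list.

-- ===== PORT A =====
-- 'if "start" in item: d[item["start"]] = item' folded over a list (A's dict comprehensions)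
def pvIdx (init : PySem.Dict String (PySem.Dict String String)) (xs : List (List (String × String))) : PySem.Dict String (PySem.Dict String String) :=
  xs.foldl (fun d item =>
    let it := PySem.Dict.ofList item
    if it.contains "start" then d.insert (it.getD "start" "") it else d) init

def update_archived_py (entity_id : String) (existing_archive : Option (List (List (String × String)))) (new_data : Option (List (List (String × String)))) : List (List (String × String)) :=
  let current_archived := existing_archive.getD []
  let current_by_start := pvIdx PySem.Dict.empty current_archived
  let new_by_start := match new_data with
    | none => PySem.Dict.empty
    | some nd => pvIdx PySem.Dict.empty nd
  let all_starts := PySem.Set.union (PySem.Set.ofList (PySem.Dict.keys current_by_start)) (PySem.Set.ofList (PySem.Dict.keys new_by_start))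
  (PySem.List.sorted all_starts (fun s => s) false).foldl
    (fun merged start =>
      if current_by_start.contains start
      then merged ++ [(current_by_start.getD start PySem.Dict.empty).items]
      else merged ++ [(new_by_start.getD start PySem.Dict.empty).items]) []

-- ===== PORT B =====
-- '[(it["start"], pos, it) for pos, it in enumerate(items, s)] if "start" in it' (port exact for any start s; B uses s = 0)
def pvTagged (s : Int) (items : List (List (String × String))) : List (String × Int × PySem.Dict String String) :=
  ((PySem.List.enumerate items s).filter (fun p => (PySem.Dict.ofList p.2).contains "start")).map
    (fun p => ((PySem.Dict.ofList p.2).getD "start" "", p.1, PySem.Dict.ofList p.2))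

-- loop body: 'if not merged or merged[-1][0] != start: merged.append((start, it))'
def pvDedupStep (acc : List (String × PySem.Dict String String)) (t : String × Int × PySem.Dict String String) : List (String × PySem.Dict String String) :=
  if acc.getLast?.map Prod.fst ≠ some t.1 then acc ++ [(t.1, t.2.2)] else acc

def update_archived_py_alt (entity_id : String) (existing_archive : Option (List (List (String × String)))) (new_data : Option (List (List (String × String)))) : List (List (String × String)) :=
  let items := new_data.getD [] ++ existing_archive.getD []
  let tagged := pvTagged 0 items
  let sortedTagged := PySem.List.sorted2 tagged (fun t => t.1) (fun t => -t.2.1) false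
  let merged := sortedTagged.foldl pvDedupStep []
  merged.map (fun p => p.2.items)

-- ===== PRECONDITION & SPEC =====
def Spec_update_archived_py (entity_id : String) (existing_archive : Option (List (List (String × String)))) (new_data : Option (List (List (String × String)))) (out : List (List (String × String))) : Prop := out = update_archived_py_alt entity_id existing_archive new_data
instance (entity_id : String) (existing_archive : Option (List (List (String × String)))) (new_data : Option (List (List (String × String)))) (out : List (List (String × String))) : Decidable (Spec_update_archived_py entity_id existing_archive new_data out) := by unfold Spec_update_archived_py; infer_instance

-- ===== CLAIM (what is proved, stated in full; the proofs are below) =====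
def Claim_equal_update_archived_py : Prop := ∀ (entity_id : String) (existing_archive : Option (List (List (String × String)))) (new_data : Option (List (List (String × String)))), Dom_update_archived_py entity_id existing_archive new_data → Spec_update_archived_py entity_id existing_archive new_data (update_archived_py entity_id existing_archive new_data)

-- ===== LEMMAS AND PROOFS =====

-- ---------- A-side: A's output is the merged dict, read off in sorted key order ----------

theorem pvIdx_cons (init : PySem.Dict String (PySem.Dict String String)) (item : List (String × String)) (rest : List (List (String × String))) :
    pvIdx init (item :: rest)
      = pvIdx (if (PySem.Dict.ofList item).contains "start"
               then init.insert ((PySem.Dict.ofList item).getD "start" "") (PySem.Dict.ofList item)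
               else init) rest := rfl

theorem pvIdx_get? (xs : List (List (String × String))) (init : PySem.Dict String (PySem.Dict String String)) (k : String) :
    (pvIdx init xs).get? k = ((pvIdx PySem.Dict.empty xs).get? k).or (init.get? k) := by
  induction xs generalizing init with
  | nil => simp [pvIdx]
  | cons item rest ih =>
    rw [pvIdx_cons, pvIdx_cons, ih]
    conv_rhs => rw [ih]
    rw [Option.or_assoc]
    congr 1
    split_ifs with h
    · rw [PySem.Dict.get?_insert, PySem.Dict.get?_insert]
      split_ifs <;> simp [PySem.Dict.get?_empty]
    · simp [PySem.Dict.get?_empty]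

theorem pvIdx_nodup_keys (xs : List (List (String × String))) (init : PySem.Dict String (PySem.Dict String String)) (h : init.keys.Nodup) : (pvIdx init xs).keys.Nodup := by
  induction xs generalizing init with
  | nil => exact h
  | cons item rest ih =>
    simp only [pvIdx, List.foldl_cons] at *
    apply ih
    split_ifs
    · exact PySem.Dict.nodup_keys_insert _ _ _ h
    · exact h

-- the merged dict's bindings: current's value where current has the key, else new's
theorem merged_get? (cur nw : List (List (String × String))) (k : String) :
    (pvIdx (pvIdx PySem.Dict.empty nw) cur).get? k
      = if (pvIdx PySem.Dict.empty cur).contains k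
        then (pvIdx PySem.Dict.empty cur).get? k
        else (pvIdx PySem.Dict.empty nw).get? k := by
  rw [pvIdx_get?, PySem.Dict.contains_eq_isSome_get?]
  cases h : (pvIdx PySem.Dict.empty cur).get? k <;> simp [Option.or]

theorem a_eq_canon (cur nw : List (List (String × String))) :
    (PySem.List.sorted (PySem.Set.union (PySem.Set.ofList (PySem.Dict.keys (pvIdx PySem.Dict.empty cur))) (PySem.Set.ofList (PySem.Dict.keys (pvIdx PySem.Dict.empty nw)))) (fun s => s) false).foldl
      (fun merged start =>
        if (pvIdx PySem.Dict.empty cur).contains start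
        then merged ++ [((pvIdx PySem.Dict.empty cur).getD start PySem.Dict.empty).items]
        else merged ++ [((pvIdx PySem.Dict.empty nw).getD start PySem.Dict.empty).items]) []
    = (PySem.List.sorted (PySem.Dict.keys (pvIdx (pvIdx PySem.Dict.empty nw) cur)) (fun s => s) false).map
        (fun k => ((pvIdx (pvIdx PySem.Dict.empty nw) cur).getD k PySem.Dict.empty).items) := by
  -- A's loop body appends in both branches: pull the if inside, then the foldl is a map
  have hbody : (fun (merged : List (List (String × String))) start =>
      if (pvIdx PySem.Dict.empty cur).contains start
      then merged ++ [((pvIdx PySem.Dict.empty cur).getD start PySem.Dict.empty).items]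
      else merged ++ [((pvIdx PySem.Dict.empty nw).getD start PySem.Dict.empty).items])
      = fun merged start => merged ++ [if (pvIdx PySem.Dict.empty cur).contains start
          then ((pvIdx PySem.Dict.empty cur).getD start PySem.Dict.empty).items
          else ((pvIdx PySem.Dict.empty nw).getD start PySem.Dict.empty).items] := by
    funext merged start; split_ifs <;> rfl
  rw [hbody, PySem.List.foldl_append_singleton_eq_map, List.nil_append]
  -- the two sorted key lists are equal (same key set, both nodup, injective identity key)
  have hperm : (PySem.Set.union (PySem.Set.ofList (PySem.Dict.keys (pvIdx PySem.Dict.empty cur))) (PySem.Set.ofList (PySem.Dict.keys (pvIdx PySem.Dict.empty nw)))).Perm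
      (PySem.Dict.keys (pvIdx (pvIdx PySem.Dict.empty nw) cur)) := by
    rw [List.perm_ext_iff_of_nodup
      (PySem.Set.nodup_union _ _ (PySem.Set.nodup_ofList _))
      (pvIdx_nodup_keys _ _ (pvIdx_nodup_keys _ _ PySem.Dict.nodup_keys_empty))]
    intro a
    rw [PySem.Set.mem_union, PySem.Set.mem_ofList, PySem.Set.mem_ofList,
      ← PySem.Dict.contains_iff_mem_keys, ← PySem.Dict.contains_iff_mem_keys,
      ← PySem.Dict.contains_iff_mem_keys,
      PySem.Dict.contains_eq_isSome_get?, PySem.Dict.contains_eq_isSome_get?,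
      PySem.Dict.contains_eq_isSome_get?, merged_get?, PySem.Dict.contains_eq_isSome_get?]
    cases h : (pvIdx PySem.Dict.empty cur).get? a <;> simp
  rw [PySem.List.sorted_eq_sorted_of_perm _ _ _ (fun _ _ h => h) hperm]
  apply List.map_congr_left
  intro k hk
  rw [PySem.List.mem_sorted, ← PySem.Dict.contains_iff_mem_keys,
    PySem.Dict.contains_eq_isSome_get?] at hk
  have hMk := merged_get? cur nw k
  by_cases h : (pvIdx PySem.Dict.empty cur).contains k = true
  · rw [if_pos h]
    rw [if_pos h] at hMk
    rw [PySem.Dict.contains_eq_isSome_get?] at h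
    cases hv : (pvIdx PySem.Dict.empty cur).get? k with
    | none => rw [hv] at h; simp at h
    | some v =>
      rw [hv] at hMk
      rw [PySem.Dict.getD_of_get?_eq_some _ _ hv, PySem.Dict.getD_of_get?_eq_some _ _ hMk]
  · rw [if_neg h]
    rw [if_neg h] at hMk
    cases hv : (pvIdx PySem.Dict.empty nw).get? k with
    | none => rw [hv] at hMk; rw [hMk] at hk; simp at hk
    | some v =>
      rw [hv] at hMk
      rw [PySem.Dict.getD_of_get?_eq_some _ _ hv, PySem.Dict.getD_of_get?_eq_some _ _ hMk]

-- ---------- B-side: the sorted tag list and the run-dedup loop ----------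

-- the boolean 'before' test sorted2 uses for key (t[0], -t[1]), and the matching ≤ relation
def pvBef (a b : String × Int × PySem.Dict String String) : Bool :=
  decide (a.1 < b.1) || (!decide (b.1 < a.1) && decide (-a.2.1 < -b.2.1))

def pvLe (a b : String × Int × PySem.Dict String String) : Prop :=
  a.1 < b.1 ∨ (a.1 = b.1 ∧ b.2.1 ≤ a.2.1)

-- recursive form of the run-dedup loop, carrying the previous kept key
def pvDed (pk : Option String) : List (String × Int × PySem.Dict String String) → List (String × PySem.Dict String String)
  | [] => []
  | t :: rest => if pk = some t.1 then pvDed pk rest else (t.1, t.2.2) :: pvDed (some t.1) rest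

theorem pvBef_false_iff (a b : String × Int × PySem.Dict String String) :
    pvBef a b = false ↔ pvLe b a := by
  simp only [pvBef, pvLe, Bool.or_eq_false_iff, Bool.and_eq_false_iff, Bool.not_eq_false',
    decide_eq_false_iff_not, decide_eq_true_eq, not_lt]
  constructor
  · rintro ⟨h1, h2 | h2⟩
    · exact Or.inl h2
    · rcases lt_or_eq_of_le h1 with h | h
      · exact Or.inl h
      · exact Or.inr ⟨h, by omega⟩
  · rintro (h | ⟨h1, h2⟩)
    · exact ⟨le_of_lt h, Or.inl h⟩
    · exact ⟨le_of_eq h1, Or.inr (by omega)⟩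

theorem pvBef_true_le (a b : String × Int × PySem.Dict String String) (h : pvBef a b = true) : pvLe a b := by
  simp only [pvBef, Bool.or_eq_true, Bool.and_eq_true, Bool.not_eq_true', decide_eq_true_eq,
    decide_eq_false_iff_not, not_lt] at h
  rcases h with h | ⟨h1, h2⟩
  · exact Or.inl h
  · rcases lt_or_eq_of_le h1 with h | h
    · exact Or.inl h
    · exact Or.inr ⟨h, by omega⟩

theorem pvLe_trans (a b c : String × Int × PySem.Dict String String) (h1 : pvLe a b) (h2 : pvLe b c) : pvLe a c := by
  rcases h1 with h1 | ⟨h1, h1'⟩ <;> rcases h2 with h2 | ⟨h2, h2'⟩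
  · exact Or.inl (lt_trans h1 h2)
  · exact Or.inl (h2 ▸ h1)
  · exact Or.inl (h1 ▸ h2)
  · exact Or.inr ⟨h1.trans h2, by omega⟩

theorem pvLe_key (a b : String × Int × PySem.Dict String String) (h : pvLe a b) : a.1 ≤ b.1 := by
  rcases h with h | ⟨h, _⟩
  · exact le_of_lt h
  · exact le_of_eq h

theorem pairwise_insertBy (x : String × Int × PySem.Dict String String)
    (l : List (String × Int × PySem.Dict String String)) (hl : l.Pairwise pvLe) :
    (PySem.List.insertBy pvBef x l).Pairwise pvLe := by
  induction l with
  | nil => simp [PySem.List.insertBy]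
  | cons y ys ih =>
    rw [List.pairwise_cons] at hl
    show (if pvBef x y = true then x :: y :: ys else y :: PySem.List.insertBy pvBef x ys).Pairwise pvLe
    split_ifs with hb
    · refine List.Pairwise.cons ?_ (List.Pairwise.cons hl.1 hl.2)
      intro z hz
      rcases List.mem_cons.mp hz with rfl | hz
      · exact pvBef_true_le _ _ hb
      · exact pvLe_trans _ _ _ (pvBef_true_le _ _ hb) (hl.1 z hz)
    · refine List.Pairwise.cons ?_ (ih hl.2)
      intro z hz
      rcases (PySem.List.mem_insertBy _ _ _ _).mp hz with rfl | hz
      · exact (pvBef_false_iff _ _).mp (Bool.eq_false_iff.mpr hb)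
      · exact hl.1 z hz

theorem foldl_insertBy_pairwise (xs acc : List (String × Int × PySem.Dict String String))
    (hacc : acc.Pairwise pvLe) :
    (xs.foldl (fun acc x => PySem.List.insertBy pvBef x acc) acc).Pairwise pvLe := by
  induction xs generalizing acc with
  | nil => exact hacc
  | cons x xs ih => exact ih _ (pairwise_insertBy x acc hacc)

theorem sorted2_eq_foldl (xs : List (String × Int × PySem.Dict String String)) :
    PySem.List.sorted2 xs (fun t => t.1) (fun t => -t.2.1) false
      = xs.foldl (fun acc x => PySem.List.insertBy pvBef x acc) [] := rfl

-- find? on a pvLe-sorted list returns the key-k tag of maximal position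
theorem find?_sorted_max (L : List (String × Int × PySem.Dict String String))
    (hL : L.Pairwise pvLe) (k : String) (t : String × Int × PySem.Dict String String)
    (ht : L.find? (fun u => decide (u.1 = k)) = some t) :
    t.1 = k ∧ t ∈ L ∧ ∀ u ∈ L, u.1 = k → u.2.1 ≤ t.2.1 := by
  induction L with
  | nil => simp at ht
  | cons y L ih =>
    rw [List.pairwise_cons] at hL
    by_cases hy : y.1 = k
    · rw [List.find?_cons_of_pos (by simpa using hy)] at ht
      cases ht
      refine ⟨hy, List.mem_cons_self, ?_⟩
      intro u hu hk
      rcases List.mem_cons.mp hu with rfl | hu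
      · omega
      · rcases hL.1 u hu with h | ⟨_, h⟩
        · rw [hy, hk] at h; exact absurd h (lt_irrefl _)
        · exact h
    · rw [List.find?_cons_of_neg (by simpa using hy)] at ht
      obtain ⟨h1, h2, h3⟩ := ih hL.2 ht
      refine ⟨h1, List.mem_cons_of_mem _ h2, ?_⟩
      intro u hu hk
      rcases List.mem_cons.mp hu with rfl | hu
      · exact absurd hk hy
      · exact h3 u hu hk

-- ---------- the tag list over the concatenation, versus the merged dict ----------

theorem pvTagged_cons (s : Int) (z : List (String × String)) (zs : List (List (String × String))) :
    pvTagged s (z :: zs)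
      = (if (PySem.Dict.ofList z).contains "start"
         then [((PySem.Dict.ofList z).getD "start" "", s, PySem.Dict.ofList z)]
         else []) ++ pvTagged (s + 1) zs := by
  simp only [pvTagged, PySem.List.enumerate_cons, List.filter_cons]
  split_ifs with h <;> simp

theorem mem_pvTagged (s : Int) (zs : List (List (String × String))) (u : String × Int × PySem.Dict String String) :
    u ∈ pvTagged s zs
      ↔ ∃ (j : Nat) (h : j < zs.length), (PySem.Dict.ofList zs[j]).contains "start" = true
          ∧ u = ((PySem.Dict.ofList zs[j]).getD "start" "", s + j, PySem.Dict.ofList zs[j]) := by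
  simp only [pvTagged, List.mem_map, List.mem_filter, PySem.List.mem_enumerate_iff]
  constructor
  · rintro ⟨p, ⟨⟨j, hj, rfl⟩, hc⟩, rfl⟩
    exact ⟨j, hj, hc, rfl⟩
  · rintro ⟨j, hj, hc, rfl⟩
    exact ⟨(s + j, zs[j]), ⟨⟨j, hj, rfl⟩, hc⟩, rfl⟩

theorem pvTagged_lb (s : Int) (zs : List (List (String × String))) (u : String × Int × PySem.Dict String String)
    (hu : u ∈ pvTagged s zs) : s ≤ u.2.1 := by
  rw [mem_pvTagged] at hu
  obtain ⟨j, hj, _, rfl⟩ := hu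
  simp

theorem pvTagged_inj (s : Int) (zs : List (List (String × String))) (u u' : String × Int × PySem.Dict String String)
    (hu : u ∈ pvTagged s zs) (hu' : u' ∈ pvTagged s zs) (h : u.2.1 = u'.2.1) : u = u' := by
  rw [mem_pvTagged] at hu hu'
  obtain ⟨j, hj, _, rfl⟩ := hu
  obtain ⟨j', hj', _, rfl⟩ := hu'
  simp only at h
  have : j = j' := by omega
  subst this; rfl

-- no key-k binding in the dict ↔ no key-k tag
theorem idx_none_iff (zs : List (List (String × String))) (s : Int) (k : String) :
    (pvIdx PySem.Dict.empty zs).get? k = none ↔ ∀ u ∈ pvTagged s zs, u.1 ≠ k := by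
  induction zs generalizing s with
  | nil => simp [pvIdx, pvTagged, PySem.Dict.get?_empty]
  | cons z zs ih =>
    rw [pvIdx_cons, pvIdx_get?, pvTagged_cons]
    by_cases hc : (PySem.Dict.ofList z).contains "start" = true
    · simp only [if_pos hc, List.singleton_append, Option.or_eq_none_iff, List.mem_cons]
      rw [PySem.Dict.get?_insert, PySem.Dict.get?_empty]
      constructor
      · rintro ⟨h1, h2⟩ u (rfl | hu)
        · simp only; intro hk; rw [if_pos hk.symm] at h2; exact absurd h2 (by simp)
        · exact (ih (s + 1)).mp h1 u hu
      · intro h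
        refine ⟨(ih (s + 1)).mpr (fun u hu => h u (Or.inr hu)), ?_⟩
        have := h _ (Or.inl rfl)
        simp only at this
        rw [if_neg (fun hk => this hk.symm)]
    · simp only [if_neg hc, List.nil_append, Option.or_eq_none_iff]
      rw [← ih (s + 1)]
      simp [PySem.Dict.get?_empty]

-- a dict binding is exactly a maximal-position key-k tag (the value inserted last wins)
theorem idx_some_iff (zs : List (List (String × String))) (s : Int) (k : String) (v : PySem.Dict String String) :
    (pvIdx PySem.Dict.empty zs).get? k = some v
      ↔ ∃ i, (k, i, v) ∈ pvTagged s zs ∧ ∀ u ∈ pvTagged s zs, u.1 = k → u.2.1 ≤ i := by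
  induction zs generalizing s v with
  | nil => simp [pvIdx, pvTagged, PySem.Dict.get?_empty]
  | cons z zs ih =>
    rw [pvIdx_cons, pvIdx_get?, pvTagged_cons]
    by_cases hc : (PySem.Dict.ofList z).contains "start" = true
    · rw [if_pos hc, if_pos hc, PySem.Dict.get?_insert, PySem.Dict.get?_empty]
      simp only [List.singleton_append, List.mem_cons]
      cases htail : (pvIdx PySem.Dict.empty zs).get? k with
      | some v' =>
        obtain ⟨i, hmem, hmax⟩ := (ih (s + 1) v').mp htail
        have hi : s + 1 ≤ i := by
          have := pvTagged_lb (s + 1) zs _ hmem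
          simpa using this
        constructor
        · intro h
          rw [Option.some_or] at h
          cases h
          refine ⟨i, Or.inr hmem, ?_⟩
          rintro u (rfl | hu) hk
          · simp only; omega
          · exact hmax u hu hk
        · rintro ⟨i', hmem', hmax'⟩
          rw [Option.some_or]
          rcases hmem' with heq | hmem'
          · exfalso
            have h1 : i ≤ i' := hmax' (k, i, v') (Or.inr hmem) rfl
            have h2 : i' = s := by
              have := congrArg (fun p => p.2.1) heq
              simpa using this
            omega
          · have := (ih (s + 1) v).mpr ⟨i', hmem', fun u hu hk => hmax' u (Or.inr hu) hk⟩
            rw [htail] at this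
            exact this
      | none =>
        have hno : ∀ u ∈ pvTagged (s + 1) zs, u.1 ≠ k := (idx_none_iff zs (s + 1) k).mp htail
        rw [Option.none_or]
        by_cases hk : k = (PySem.Dict.ofList z).getD "start" ""
        · rw [if_pos hk]
          constructor
          · intro h
            cases h
            refine ⟨s, Or.inl (by rw [hk]), ?_⟩
            rintro u (rfl | hu) _
            · simp only; omega
            · exact absurd (by assumption) (hno u hu)
          · rintro ⟨i', hmem', hmax'⟩
            rcases hmem' with heq | hmem'
            · have := congrArg (fun p => p.2.2) heq
              simpa using this.symm
            · exact absurd rfl (hno _ hmem')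
        · rw [if_neg hk]
          constructor
          · intro h; exact absurd h (by simp)
          · rintro ⟨i', hmem', hmax'⟩
            rcases hmem' with heq | hmem'
            · exact absurd (congrArg (fun p => p.1) heq) (by simpa using hk)
            · exact absurd rfl (hno _ hmem')
    · rw [if_neg hc, if_neg hc, PySem.Dict.get?_empty, Option.or_none, List.nil_append]
      exact ih (s + 1) v

-- ---------- the dedup loop ----------

theorem foldl_dedup (L : List (String × Int × PySem.Dict String String))
    (acc : List (String × PySem.Dict String String)) :
    L.foldl pvDedupStep acc = acc ++ pvDed (acc.getLast?.map Prod.fst) L := by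
  induction L generalizing acc with
  | nil => simp [pvDed]
  | cons t L ih =>
    rw [List.foldl_cons, ih]
    by_cases h : acc.getLast?.map Prod.fst = some t.1
    · rw [show pvDedupStep acc t = acc from if_neg (by simp [h])]
      simp only [pvDed]
      rw [if_pos h]
    · rw [show pvDedupStep acc t = acc ++ [(t.1, t.2.2)] from if_pos h]
      conv_rhs => simp only [pvDed]
      rw [if_neg h]
      simp

-- every kept key is strictly above the carried previous key
theorem pvDed_gt_pk (L : List (String × Int × PySem.Dict String String)) (pk : Option String)
    (hL : L.Pairwise pvLe) (hpk : ∀ u ∈ L, ∀ k0, pk = some k0 → k0 ≤ u.1)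
    (k : String) (v : PySem.Dict String String) (h : (k, v) ∈ pvDed pk L) :
    ∀ k0, pk = some k0 → k0 < k := by
  induction L generalizing pk with
  | nil => simp [pvDed] at h
  | cons t L ih =>
    rw [List.pairwise_cons] at hL
    unfold pvDed at h
    split_ifs at h with hpkt
    · exact ih pk hL.2 (fun u hu => hpk u (List.mem_cons_of_mem _ hu)) h
    · rcases List.mem_cons.mp h with heq | h
      · intro k0 hk0
        have h1 : k0 ≤ t.1 := hpk t List.mem_cons_self k0 hk0
        have h2 : k = t.1 := congrArg Prod.fst heq
        rcases lt_or_eq_of_le h1 with h' | h'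
        · exact h2 ▸ h'
        · exact absurd (h' ▸ hk0) (h2 ▸ hpkt)
      · intro k0 hk0
        have ht1 : t.1 < k := ih (some t.1) hL.2 (fun u hu k0' hk0' => by
          cases Option.some.inj hk0'; exact pvLe_key _ _ (hL.1 u hu)) h t.1 rfl
        have : k0 ≤ t.1 := hpk t List.mem_cons_self k0 hk0
        exact lt_of_le_of_lt this ht1

theorem pvDed_pairwise (L : List (String × Int × PySem.Dict String String)) (pk : Option String)
    (hL : L.Pairwise pvLe) (hpk : ∀ u ∈ L, ∀ k0, pk = some k0 → k0 ≤ u.1) :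
    (pvDed pk L).Pairwise (fun a b => a.1 < b.1) := by
  induction L generalizing pk with
  | nil => simp [pvDed]
  | cons t L ih =>
    rw [List.pairwise_cons] at hL
    unfold pvDed
    split_ifs with hpkt
    · exact ih pk hL.2 (fun u hu => hpk u (List.mem_cons_of_mem _ hu))
    · refine List.Pairwise.cons ?_ (ih (some t.1) hL.2 (fun u hu k0' hk0' => by
        cases Option.some.inj hk0'; exact pvLe_key _ _ (hL.1 u hu)))
      intro p hp
      exact pvDed_gt_pk L (some t.1) hL.2 (fun u hu k0' hk0' => by
        cases Option.some.inj hk0'; exact pvLe_key _ _ (hL.1 u hu)) p.1 p.2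
        (by exact hp) t.1 rfl

-- membership in the dedup result: the first key-k tag of the sorted list
theorem pvDed_mem (L : List (String × Int × PySem.Dict String String)) (pk : Option String)
    (hL : L.Pairwise pvLe) (hpk : ∀ u ∈ L, ∀ k0, pk = some k0 → k0 ≤ u.1)
    (k : String) (v : PySem.Dict String String) :
    (k, v) ∈ pvDed pk L
      ↔ pk ≠ some k ∧ ∃ i, L.find? (fun u => decide (u.1 = k)) = some (k, i, v) := by
  induction L generalizing pk with
  | nil => simp [pvDed]
  | cons t L ih =>
    rw [List.pairwise_cons] at hL
    have hinv : ∀ u ∈ L, ∀ k0, some t.1 = some k0 → k0 ≤ u.1 := by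
      intro u hu k0 h
      cases Option.some.inj h
      exact pvLe_key _ _ (hL.1 u hu)
    by_cases hpkt : pk = some t.1
    · simp only [pvDed]
      rw [if_pos hpkt]
      by_cases hk : t.1 = k
      · rw [List.find?_cons_of_pos (by simpa using hk)]
        constructor
        · intro h
          have := (ih pk hL.2 (fun u hu => hpk u (List.mem_cons_of_mem _ hu))).mp h
          exact absurd (hpkt.trans (by rw [hk])) this.1
        · rintro ⟨hne, _⟩
          exact absurd (hpkt.trans (by rw [hk])) hne
      · rw [List.find?_cons_of_neg (by simpa using hk)]
        exact ih pk hL.2 (fun u hu => hpk u (List.mem_cons_of_mem _ hu))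
    · simp only [pvDed]
      rw [if_neg hpkt, List.mem_cons]
      by_cases hk : t.1 = k
      · rw [List.find?_cons_of_pos (by simpa using hk)]
        constructor
        · rintro (heq | h)
          · have hv : v = t.2.2 := congrArg Prod.snd heq
            refine ⟨by rw [← hk]; exact hpkt, t.2.1, ?_⟩
            rw [← hk, hv]
          · exfalso
            have := pvDed_gt_pk L (some t.1) hL.2 hinv k v h t.1 rfl
            exact absurd (hk ▸ this) (lt_irrefl _)
        · rintro ⟨hne, i, hfind⟩
          left
          have := Option.some.inj hfind
          have hv : v = t.2.2 := by
            have := congrArg (fun p => p.2.2) this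
            simpa using this.symm
          rw [hv, ← hk]
      · rw [List.find?_cons_of_neg (by simpa using hk)]
        constructor
        · rintro (heq | h)
          · exact absurd (congrArg Prod.fst heq) (fun h' => hk h'.symm)
          · have := (ih (some t.1) hL.2 hinv).mp h
            refine ⟨?_, this.2⟩
            intro hpke
            obtain ⟨i, hfind⟩ := this.2
            have hmem := List.mem_of_find?_eq_some hfind
            have h1 : t.1 ≤ k := pvLe_key _ _ (hL.1 _ hmem)
            have h2 : k ≤ t.1 := hpk t List.mem_cons_self k hpke
            exact hk (le_antisymm h1 h2)
        · rintro ⟨hne, i, hfind⟩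
          exact Or.inr ((ih (some t.1) hL.2 hinv).mpr
            ⟨fun h' => hk (Option.some.inj h'), i, hfind⟩)

-- ---------- equality of strictly key-sorted pair lists ----------

theorem eq_of_key_strict (xs ys : List (String × PySem.Dict String String))
    (hx : xs.Pairwise (fun a b => a.1 < b.1)) (hy : ys.Pairwise (fun a b => a.1 < b.1))
    (hmem : ∀ p, p ∈ xs ↔ p ∈ ys) : xs = ys := by
  induction xs generalizing ys with
  | nil =>
    cases ys with
    | nil => rfl
    | cons y ys => exact absurd ((hmem y).mpr List.mem_cons_self) (List.not_mem_nil)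
  | cons x xs ih =>
    cases ys with
    | nil => exact absurd ((hmem x).mp List.mem_cons_self) (List.not_mem_nil)
    | cons y ys =>
      rw [List.pairwise_cons] at hx hy
      have hxy : x = y := by
        rcases List.mem_cons.mp ((hmem x).mp List.mem_cons_self) with h | h
        · exact h
        · rcases List.mem_cons.mp ((hmem y).mpr List.mem_cons_self) with h' | h'
          · exact h'.symm
          · exact absurd (lt_trans (hy.1 x h) (hx.1 y h')) (lt_irrefl _)
      subst hxy
      congr 1
      refine ih ys hx.2 hy.2 ?_
      intro p
      constructor
      · intro hp
        rcases List.mem_cons.mp ((hmem p).mp (List.mem_cons_of_mem _ hp)) with rfl | h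
        · exact absurd (hx.1 p hp) (lt_irrefl _)
        · exact h
      · intro hp
        rcases List.mem_cons.mp ((hmem p).mpr (List.mem_cons_of_mem _ hp)) with rfl | h
        · exact absurd (hy.1 p hp) (lt_irrefl _)
        · exact h

-- ---------- assembling B ----------

theorem b_eq_canon (cur nw : List (List (String × String))) :
    ((PySem.List.sorted2 (pvTagged 0 (nw ++ cur)) (fun t => t.1) (fun t => -t.2.1) false).foldl
        pvDedupStep []).map (fun p => p.2.items)
      = (PySem.List.sorted (PySem.Dict.keys (pvIdx (pvIdx PySem.Dict.empty nw) cur)) (fun s => s) false).map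
          (fun k => ((pvIdx (pvIdx PySem.Dict.empty nw) cur).getD k PySem.Dict.empty).items) := by
  have hM : pvIdx (pvIdx PySem.Dict.empty nw) cur = pvIdx PySem.Dict.empty (nw ++ cur) := by
    simp [pvIdx, List.foldl_append]
  rw [hM]
  have hLperm : (PySem.List.sorted2 (pvTagged 0 (nw ++ cur)) (fun t => t.1) (fun t => -t.2.1) false).Perm
      (pvTagged 0 (nw ++ cur)) := PySem.List.sorted2_perm _ _ _ _
  rw [sorted2_eq_foldl]
  have hLpair : ((pvTagged 0 (nw ++ cur)).foldl (fun acc x => PySem.List.insertBy pvBef x acc) []).Pairwise pvLe :=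
    foldl_insertBy_pairwise _ [] (by simp)
  rw [← sorted2_eq_foldl] at hLpair ⊢
  set L := PySem.List.sorted2 (pvTagged 0 (nw ++ cur)) (fun t => t.1) (fun t => -t.2.1) false with hLdef
  set M := pvIdx PySem.Dict.empty (nw ++ cur) with hMdef
  have hDed : L.foldl pvDedupStep [] = pvDed none L := by
    rw [foldl_dedup]; simp
  rw [hDed]
  -- membership of the dedup result = bindings of the merged dict
  have hBmem : ∀ (k : String) (v : PySem.Dict String String),
      (k, v) ∈ pvDed none L ↔ M.get? k = some v := by
    intro k v
    rw [pvDed_mem L none hLpair (by simp) k v]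
    constructor
    · rintro ⟨-, i, hfind⟩
      obtain ⟨-, hmemL, hmax⟩ := find?_sorted_max L hLpair k _ hfind
      refine (idx_some_iff (nw ++ cur) 0 k v).mpr ⟨i, hLperm.mem_iff.mp hmemL, ?_⟩
      intro u hu hk
      exact hmax u (hLperm.mem_iff.mpr hu) hk
    · intro h
      obtain ⟨i, hmemT, hmax⟩ := (idx_some_iff (nw ++ cur) 0 k v).mp h
      have hmemL : (k, i, v) ∈ L := hLperm.mem_iff.mpr hmemT
      cases hfind : L.find? (fun u => decide (u.1 = k)) with
      | none =>
        have := List.find?_eq_none.mp hfind _ hmemL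
        simp at this
      | some t =>
        obtain ⟨ht1, htL, htmax⟩ := find?_sorted_max L hLpair k t hfind
        have h1 : t.2.1 ≤ i := hmax t (hLperm.mem_iff.mp htL) ht1
        have h2 : i ≤ t.2.1 := htmax _ hmemL rfl
        have heq : t = (k, i, v) := pvTagged_inj 0 (nw ++ cur) t (k, i, v)
          (hLperm.mem_iff.mp htL) hmemT (by show t.2.1 = i; omega)
        exact ⟨by simp, i, by rw [heq]⟩
  have hnd : M.keys.Nodup := pvIdx_nodup_keys _ _ PySem.Dict.nodup_keys_empty
  -- membership of the canonical key-sorted pair list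
  have hAmem : ∀ (k : String) (v : PySem.Dict String String),
      (k, v) ∈ (PySem.List.sorted M.keys (fun s => s) false).map (fun k => (k, M.getD k PySem.Dict.empty))
        ↔ M.get? k = some v := by
    intro k v
    simp only [List.mem_map, PySem.List.mem_sorted]
    constructor
    · rintro ⟨k', hk', heq⟩
      have hk : k' = k := congrArg Prod.fst heq
      have hv : M.getD k' PySem.Dict.empty = v := congrArg Prod.snd heq
      subst hk
      rw [← PySem.Dict.contains_iff_mem_keys, PySem.Dict.contains_eq_isSome_get?] at hk'
      cases hw : M.get? k' with
      | none => rw [hw] at hk'; simp at hk'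
      | some w => rw [← hv, PySem.Dict.getD_of_get?_eq_some _ _ hw]
    · intro h
      refine ⟨k, ?_, by rw [PySem.Dict.getD_of_get?_eq_some _ _ h]⟩
      rw [← PySem.Dict.contains_iff_mem_keys, PySem.Dict.contains_eq_isSome_get?, h]
      rfl
  -- both are strictly key-sorted, with the same members
  have hpairs : pvDed none L
      = (PySem.List.sorted M.keys (fun s => s) false).map (fun k => (k, M.getD k PySem.Dict.empty)) := by
    refine eq_of_key_strict _ _ (pvDed_pairwise L none hLpair (by simp)) ?_ ?_
    · rw [List.pairwise_map]
      have hle : (PySem.List.sorted M.keys (fun s => s) false).Pairwise (fun a b => a ≤ b) :=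
        PySem.List.sorted_pairwise M.keys (fun s => s)
      have hnd' : (PySem.List.sorted M.keys (fun s => s) false).Nodup :=
        (PySem.List.sorted_perm M.keys (fun s => s) false).symm.nodup hnd
      exact (hle.and hnd').imp (fun h => lt_of_le_of_ne h.1 h.2)
    · intro p
      cases p with
      | mk k v => rw [hBmem k v, hAmem k v]
  rw [hpairs, List.map_map]
  rfl

theorem update_archived_py_eq (entity_id : String) (existing_archive : Option (List (List (String × String)))) (new_data : Option (List (List (String × String)))) :
    update_archived_py entity_id existing_archive new_data = update_archived_py_alt entity_id existing_archive new_data := by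
  unfold update_archived_py update_archived_py_alt
  cases new_data with
  | none => exact ((b_eq_canon (existing_archive.getD []) []).trans (a_eq_canon (existing_archive.getD []) []).symm).symm
  | some nd => exact ((b_eq_canon (existing_archive.getD []) nd).trans (a_eq_canon (existing_archive.getD []) nd).symm).symm

-- ===== VERDICT (by name: the statement is the Claim_ definition above) =====
theorem update_archived_py_spec : Claim_equal_update_archived_py := by
  intro eid ex nd _
  exact update_archived_py_eq eid ex nd
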